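-- pv_equiv track=rewrite | github.com/radmitr/data-structures-and-algorithms | info/1. Алгоритмы/4. Комбинаторика/2. Генерация перестановок. Алгоритм Джонсона-Троттера/code sample/Johnson_Trotter_algorithm.py | find_max_mobile_element
-- ===== SOURCE A (Python) =====
-- def find_max_mobile_element(permutation, direction):
--     index = -1
--     for i in range(len(permutation)):
--         next_element_index = i + direction[i]
--         if next_element_index >= 0 and next_element_index < len(permutation):
--             if permutation[i] > permutation[next_element_index]:
--                 if index == -1:
--                     index = i
--                 else:
--                     if permutation[i] > permutation[index]:
--                         index = i
--     return index
-- ===== SOURCE B (Python) =====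
-- def find_max_mobile_element(permutation, direction):
--     n = len(permutation)
--     # Visit indices in decreasing value order (ties: smaller index first);
--     # the first mobile one visited is the largest mobile element.
--     for i in sorted(range(n), key=lambda i: (-permutation[i], i)):
--         j = i + direction[i]
--         if 0 <= j < n and permutation[j] < permutation[i]:
--             return i
--     return -1
-- ===== Notes on version B (the rewrite author's own statement) =====
-- stated objective: alternative
-- what changed: Instead of A's single fused scan that maintains a running best index, B sorts the indices by (value descending, index ascending) and returns the first index in that order that is mobile, so selection of the maximum disappears into the sort order.
import Mathlib
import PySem

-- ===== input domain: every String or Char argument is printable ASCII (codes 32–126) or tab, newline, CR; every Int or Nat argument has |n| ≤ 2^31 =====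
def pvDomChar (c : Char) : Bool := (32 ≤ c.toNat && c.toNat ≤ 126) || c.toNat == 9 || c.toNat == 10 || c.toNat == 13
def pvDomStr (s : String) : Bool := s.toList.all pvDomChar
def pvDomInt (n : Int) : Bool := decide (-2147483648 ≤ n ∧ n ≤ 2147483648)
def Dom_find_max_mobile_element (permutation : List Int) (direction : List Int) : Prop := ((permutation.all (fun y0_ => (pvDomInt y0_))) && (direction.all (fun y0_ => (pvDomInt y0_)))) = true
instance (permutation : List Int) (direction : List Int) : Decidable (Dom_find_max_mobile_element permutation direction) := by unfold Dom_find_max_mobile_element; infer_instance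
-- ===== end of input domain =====

-- B replaces A's fused linear scan (running best index with nested updates) by a different
-- algorithm: sort the indices by (value descending, index ascending) and return the first
-- mobile index in that order — the largest mobile element is simply the first hit.

-- ===== PORT A =====
def find_max_mobile_element (permutation : List Int) (direction : List Int) : Int :=
  (PySem.List.pyRange 0 permutation.length 1).foldl
    (fun index i =>
      let next_element_index := i + (PySem.List.pyGet? direction i).getD 0
      if next_element_index ≥ 0 ∧ next_element_index < (permutation.length : Int) then
        if (PySem.List.pyGet? permutation i).getD 0 > (PySem.List.pyGet? permutation next_element_index).getD 0 then
          if index = -1 then i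
          else if (PySem.List.pyGet? permutation i).getD 0 > (PySem.List.pyGet? permutation index).getD 0 then i
          else index
        else index
      else index)
    (-1)

-- ===== PORT B =====
def find_max_mobile_element_alt (permutation : List Int) (direction : List Int) : Int :=
  let n : Int := permutation.length
  -- sorted(range(n), key=lambda i: (-permutation[i], i))
  let order := PySem.List.sorted2 (PySem.List.pyRange 0 n 1)
    (fun i => -((PySem.List.pyGet? permutation i).getD 0)) (fun i => i) false
  -- for i in order: if mobile, return i; return -1
  match order.find? (fun i =>
      decide (0 ≤ i + (PySem.List.pyGet? direction i).getD 0) &&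
      decide (i + (PySem.List.pyGet? direction i).getD 0 < n) &&
      decide ((PySem.List.pyGet? permutation (i + (PySem.List.pyGet? direction i).getD 0)).getD 0 <
              (PySem.List.pyGet? permutation i).getD 0)) with
  | none => -1
  | some i => i

-- ===== PRECONDITION & SPEC =====
-- Pre_ excludes only inputs where Python A raises IndexError: direction shorter than permutation.
def Pre_find_max_mobile_element (permutation : List Int) (direction : List Int) : Prop :=
  permutation.length ≤ direction.length
instance (permutation : List Int) (direction : List Int) : Decidable (Pre_find_max_mobile_element permutation direction) := by unfold Pre_find_max_mobile_element; infer_instance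
def pvWitness_find_max_mobile_element : List Int × List Int := ([2, 1, 3], [-1, -1, -1])

def Spec_find_max_mobile_element (permutation : List Int) (direction : List Int) (out : Int) : Prop := out = find_max_mobile_element_alt permutation direction
instance (permutation : List Int) (direction : List Int) (out : Int) : Decidable (Spec_find_max_mobile_element permutation direction out) := by unfold Spec_find_max_mobile_element; infer_instance

-- ===== CLAIM (what is proved, stated in full; the proofs are below) =====
def Claim_equal_find_max_mobile_element : Prop := ∀ (permutation : List Int) (direction : List Int), Dom_find_max_mobile_element permutation direction → Pre_find_max_mobile_element permutation direction → Spec_find_max_mobile_element permutation direction (find_max_mobile_element permutation direction)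

-- ===== LEMMAS AND PROOFS =====

-- the lexicographic key B sorts by: (-permutation[i], i)
def pv_key (p : List Int) (i : Int) : Int ×ₗ Int := toLex (-(PySem.List.pyGet? p i).getD 0, i)

-- the mobile-index predicate both programs test
def pv_mob (p d : List Int) (i : Int) : Bool :=
  decide (0 ≤ i + (PySem.List.pyGet? d i).getD 0) &&
  decide (i + (PySem.List.pyGet? d i).getD 0 < (p.length : Int)) &&
  decide ((PySem.List.pyGet? p (i + (PySem.List.pyGet? d i).getD 0)).getD 0 <
          (PySem.List.pyGet? p i).getD 0)

-- A's accumulator step on the mobile indices (keep the best, strict-greater replaces)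
def pv_mstep (p : List Int) (acc : Option Int) (x : Int) : Option Int :=
  match acc with
  | none => some x
  | some m => if (PySem.List.pyGet? p m).getD 0 < (PySem.List.pyGet? p x).getD 0 then some x else some m

theorem pv_key_inj (p : List Int) {a b : Int} (h : pv_key p a = pv_key p b) : a = b := by
  have := congrArg (fun x => (ofLex x).2) h
  simpa [pv_key] using this

-- A's fused loop over l equals the pv_mstep fold over the mobile-filtered l
theorem pv_loop_eq (p d : List Int) :
    ∀ (l : List Int) (o : Option Int), (∀ x ∈ l, 0 ≤ x) → (∀ m ∈ o, 0 ≤ m) →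
    l.foldl
      (fun index i =>
        let next_element_index := i + (PySem.List.pyGet? d i).getD 0
        if next_element_index ≥ 0 ∧ next_element_index < (p.length : Int) then
          if (PySem.List.pyGet? p i).getD 0 > (PySem.List.pyGet? p next_element_index).getD 0 then
            if index = -1 then i
            else if (PySem.List.pyGet? p i).getD 0 > (PySem.List.pyGet? p index).getD 0 then i
            else index
          else index
        else index)
      (o.getD (-1)) =
    (List.foldl (pv_mstep p) o (l.filter (pv_mob p d))).getD (-1) := by
  intro l
  induction l with
  | nil => intro o _ _; rfl
  | cons i t ih =>
    intro o hl ho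
    have hi : 0 ≤ i := hl i (List.mem_cons_self ..)
    have ht : ∀ x ∈ t, 0 ≤ x := fun x hx => hl x (List.mem_cons_of_mem _ hx)
    simp only [List.foldl_cons, List.filter_cons]
    by_cases hc1 : i + (PySem.List.pyGet? d i).getD 0 ≥ 0 ∧
        i + (PySem.List.pyGet? d i).getD 0 < (p.length : Int)
    · by_cases hc2 : (PySem.List.pyGet? p i).getD 0 >
          (PySem.List.pyGet? p (i + (PySem.List.pyGet? d i).getD 0)).getD 0
      · have hpred : pv_mob p d i = true := by
          simp only [pv_mob, Bool.and_eq_true, decide_eq_true_eq]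
          exact ⟨⟨hc1.1, hc1.2⟩, hc2⟩
        rw [hpred, if_pos rfl]
        simp only [List.foldl_cons]
        cases o with
        | none =>
          simp only [Option.getD_none, if_pos hc1, if_pos hc2, pv_mstep]
          exact ih (some i) ht (by intro m hm; simp at hm; omega)
        | some m =>
          have hm : 0 ≤ m := ho m rfl
          have hmne : m ≠ -1 := by omega
          simp only [Option.getD_some, if_pos hc1, if_pos hc2, if_neg hmne, pv_mstep]
          by_cases hgt : (PySem.List.pyGet? p i).getD 0 > (PySem.List.pyGet? p m).getD 0
          · rw [if_pos hgt, if_pos hgt]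
            exact ih (some i) ht (by intro x hx; simp at hx; omega)
          · rw [if_neg hgt, if_neg hgt]
            exact ih (some m) ht ho
      · have hpred : pv_mob p d i = false := by
          apply Bool.eq_false_iff.mpr
          intro h
          simp only [pv_mob, Bool.and_eq_true, decide_eq_true_eq] at h
          exact hc2 h.2
        rw [hpred]
        simp only [Bool.false_eq_true, if_false]
        simp only [if_pos hc1, if_neg hc2]
        exact ih o ht ho
    · have hpred : pv_mob p d i = false := by
        apply Bool.eq_false_iff.mpr
        intro h
        simp only [pv_mob, Bool.and_eq_true, decide_eq_true_eq] at h
        exact hc1 ⟨h.1.1, h.1.2⟩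
      rw [hpred]
      simp only [Bool.false_eq_true, if_false]
      simp only [if_neg hc1]
      exact ih o ht ho

-- one pv_mstep step moves to the key-smaller of the two candidates (given m < a)
theorem pv_mstep_key_le (p : List Int) {m a : Int} (h : m < a) :
    pv_mstep p (some m) a = some a ∧ pv_key p a < pv_key p m ∨
    pv_mstep p (some m) a = some m ∧ pv_key p m < pv_key p a := by
  by_cases hlt : (PySem.List.pyGet? p m).getD 0 < (PySem.List.pyGet? p a).getD 0
  · left
    refine ⟨by simp [pv_mstep, hlt], ?_⟩
    simp only [pv_key, Prod.Lex.toLex_lt_toLex]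
    left; omega
  · right
    refine ⟨by simp [pv_mstep, hlt], ?_⟩
    simp only [pv_key, Prod.Lex.toLex_lt_toLex]
    rcases lt_or_eq_of_le (le_of_not_gt hlt) with h' | h'
    · left; omega
    · right; omega

-- the pv_mstep fold returns the key-minimal candidate
theorem pv_fold_min (p : List Int) :
    ∀ (M : List Int) (m : Int), (∀ y ∈ M, m < y) → M.Pairwise (· < ·) →
    ∃ x, M.foldl (pv_mstep p) (some m) = some x ∧ (x = m ∨ x ∈ M) ∧
      ∀ y, (y = m ∨ y ∈ M) → pv_key p x ≤ pv_key p y := by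
  intro M
  induction M with
  | nil =>
    intro m _ _
    refine ⟨m, rfl, Or.inl rfl, ?_⟩
    rintro y (rfl | h)
    · exact le_rfl
    · simp at h
  | cons a t ih =>
    intro m hm hp
    have hma : m < a := hm a (List.mem_cons_self ..)
    have hat : ∀ y ∈ t, a < y := (List.pairwise_cons.mp hp).1
    have hpt : t.Pairwise (· < ·) := (List.pairwise_cons.mp hp).2
    simp only [List.foldl_cons]
    rcases pv_mstep_key_le p hma with ⟨hstep, hkey⟩ | ⟨hstep, hkey⟩
    · rw [hstep]
      obtain ⟨x, hfx, hxm, hxle⟩ := ih a hat hpt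
      refine ⟨x, hfx, ?_, ?_⟩
      · rcases hxm with rfl | h
        · exact Or.inr (List.mem_cons_self ..)
        · exact Or.inr (List.mem_cons_of_mem _ h)
      · rintro y (rfl | hy)
        · exact le_trans (hxle a (Or.inl rfl)) (le_of_lt hkey)
        · rcases List.mem_cons.mp hy with rfl | hy'
          · exact hxle y (Or.inl rfl)
          · exact hxle y (Or.inr hy')
    · rw [hstep]
      obtain ⟨x, hfx, hxm, hxle⟩ := ih m (fun y hy => lt_trans hma (hat y hy)) hpt
      refine ⟨x, hfx, ?_, ?_⟩
      · rcases hxm with rfl | h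
        · exact Or.inl rfl
        · exact Or.inr (List.mem_cons_of_mem _ h)
      · rintro y (rfl | hy)
        · exact hxle y (Or.inl rfl)
        · rcases List.mem_cons.mp hy with rfl | hy'
          · exact le_trans (hxle m (Or.inl rfl)) (le_of_lt hkey)
          · exact hxle y (Or.inr hy')

-- find? is the head of the filtered list
theorem pv_find?_eq_head?_filter {α : Type} (q : α → Bool) (l : List α) :
    l.find? q = (l.filter q).head? := by
  induction l with
  | nil => rfl
  | cons a t ih =>
    by_cases h : q a
    · simp [h]
    · simp only [List.find?_cons, List.filter_cons, h]
      exact ih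

-- sorted2 with keys (k1, k2) is sorted by the lexicographic key
theorem pv_sorted2_eq (xs : List Int) (k1 k2 : Int → Int) :
    PySem.List.sorted2 xs k1 k2 false
      = PySem.List.sorted xs (fun x => toLex (k1 x, k2 x)) false := by
  have hbf : (fun a b => decide (k1 a < k1 b) || (!decide (k1 b < k1 a) && decide (k2 a < k2 b)))
      = (fun a b => decide ((toLex (k1 a, k2 a) : Int ×ₗ Int) < toLex (k1 b, k2 b))) := by
    funext a b
    have hiff : ((toLex (k1 a, k2 a) : Int ×ₗ Int) < toLex (k1 b, k2 b)) ↔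
        (k1 a < k1 b ∨ (k1 a = k1 b ∧ k2 a < k2 b)) := Prod.Lex.toLex_lt_toLex
    rw [decide_eq_decide.mpr hiff]
    by_cases h1 : k1 a < k1 b
    · simp [h1]
    · by_cases h2 : k1 b < k1 a
      · have hne : ¬(k1 a = k1 b) := by omega
        simp [h1, h2, hne]
      · have he : k1 a = k1 b := by omega
        simp [he]
    infer_instance
  simp only [PySem.List.sorted2, PySem.List.sorted, Bool.false_eq_true, if_false]
  rw [hbf]

-- the specialization B uses: sorted2 by (-value, index) is sorted by pv_key
theorem pv_sorted2_key (p xs : List Int) :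
    PySem.List.sorted2 xs (fun i => -((PySem.List.pyGet? p i).getD 0)) (fun i => i) false
      = PySem.List.sorted xs (pv_key p) false := by
  rw [pv_sorted2_eq]
  rfl

-- the sorted index order is strictly increasing in pv_key
theorem pv_order_pairwise (p : List Int) (n : Int) :
    (PySem.List.sorted (PySem.List.pyRange 0 n 1) (pv_key p) false).Pairwise
      (fun a b => pv_key p a < pv_key p b) := by
  have hle := PySem.List.sorted_pairwise (PySem.List.pyRange 0 n 1) (pv_key p)
  have hnd : (PySem.List.sorted (PySem.List.pyRange 0 n 1) (pv_key p) false).Nodup :=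
    (PySem.List.sorted_perm (PySem.List.pyRange 0 n 1) (pv_key p) false).nodup_iff.mpr
      (PySem.List.nodup_pyRange_one 0 n)
  have := List.Pairwise.and hle hnd
  refine this.imp ?_
  rintro a b ⟨h1, h2⟩
  exact lt_of_le_of_ne h1 (fun he => h2 (pv_key_inj p he))

-- ===== VERDICT (by name: the statement is the Claim_ definition above) =====
theorem find_max_mobile_element_spec : Claim_equal_find_max_mobile_element := by
  intro p d _ _
  unfold Spec_find_max_mobile_element find_max_mobile_element find_max_mobile_element_alt
  have hA := pv_loop_eq p d (PySem.List.pyRange 0 p.length 1) none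
    (fun x hx => by have := (PySem.List.mem_pyRange_one.mp hx).1; omega) (by simp)
  simp only [Option.getD_none] at hA
  rw [hA]
  dsimp only
  rw [pv_sorted2_key p]
  have hmob : (fun i =>
      decide (0 ≤ i + (PySem.List.pyGet? d i).getD 0) &&
      decide (i + (PySem.List.pyGet? d i).getD 0 < (p.length : Int)) &&
      decide ((PySem.List.pyGet? p (i + (PySem.List.pyGet? d i).getD 0)).getD 0 <
              (PySem.List.pyGet? p i).getD 0)) = pv_mob p d := rfl
  rw [hmob, pv_find?_eq_head?_filter]
  -- the mobile indices of the sorted order are the key-sorted mobile list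
  have hperm : ((PySem.List.sorted (PySem.List.pyRange 0 (p.length : Int) 1) (pv_key p) false).filter
      (pv_mob p d)).Perm ((PySem.List.pyRange 0 (p.length : Int) 1).filter (pv_mob p d)) :=
    (PySem.List.sorted_perm _ _ _).filter _
  have hpw : ((PySem.List.sorted (PySem.List.pyRange 0 (p.length : Int) 1) (pv_key p) false).filter
      (pv_mob p d)).Pairwise (fun a b => pv_key p a < pv_key p b) :=
    (pv_order_pairwise p (p.length : Int)).filter _
  have hsorted := PySem.List.sorted_eq_of_perm_of_pairwise_lt _ _ _ hperm hpw
  rw [← hsorted]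
  have hpwM : ((PySem.List.pyRange 0 (p.length : Int) 1).filter (pv_mob p d)).Pairwise (· < ·) :=
    (PySem.List.pairwise_lt_pyRange_one 0 (p.length : Int)).filter _
  generalize hMg : (PySem.List.pyRange 0 (p.length : Int) 1).filter (pv_mob p d) = M at hpwM ⊢
  cases M with
  | nil =>
    rfl
  | cons a t =>
    have hat : ∀ y ∈ t, a < y := (List.pairwise_cons.mp hpwM).1
    obtain ⟨x, hfx, hxm, hxle⟩ := pv_fold_min p t a hat (List.pairwise_cons.mp hpwM).2
    have hfold : (a :: t).foldl (pv_mstep p) none = some x := by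
      simp only [List.foldl_cons, pv_mstep]
      exact hfx
    rw [hfold]
    rcases hsc : PySem.List.sorted (a :: t) (pv_key p) false with _ | ⟨h, t'⟩
    · have hp := PySem.List.sorted_perm (a :: t) (pv_key p) false
      rw [hsc] at hp
      simpa using hp.length_eq
    · have hhmem : h ∈ (a :: t) := by
        have hp := PySem.List.sorted_perm (a :: t) (pv_key p) false
        rw [hsc] at hp
        exact hp.mem_iff.mp (List.mem_cons_self ..)
      have hhle : ∀ y ∈ (a :: t), pv_key p h ≤ pv_key p y :=
        PySem.List.key_head_sorted_le _ _ hsc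
      have hxmem : x ∈ (a :: t) := by
        rcases hxm with rfl | hx
        · exact List.mem_cons_self ..
        · exact List.mem_cons_of_mem _ hx
      have h1 : pv_key p x ≤ pv_key p h := by
        apply hxle
        rcases List.mem_cons.mp hhmem with rfl | hh
        · exact Or.inl rfl
        · exact Or.inr hh
      have h2 : pv_key p h ≤ pv_key p x := hhle x hxmem
      have hxh : x = h := pv_key_inj p (le_antisymm h1 h2)
      simp [hxh]
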